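-- pv_equiv track=rewrite | github.com/ioanbeilic/djicons | src/djicons/scanner.py | group_icons_by_namespace
-- ===== SOURCE A (Python) =====
-- def parse_icon_name(name: str, default_namespace: str = "ion") -> tuple[str, str]:
--     """
--     Parse an icon name into namespace and name.
--
--     Args:
--         name: Icon name (e.g., 'home', 'ion:home', 'hero:pencil')
--         default_namespace: Default namespace if not specified
--
--     Returns:
--         Tuple of (namespace, icon_name)
--     """
--     if ":" in name:
--         namespace, icon_name = name.split(":", 1)
--         return namespace, icon_name
--     return default_namespace, name
--
-- def group_icons_by_namespace(
--     icons: set[str], default_namespace: str = "ion"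
-- ) -> dict[str, set[str]]:
--     """
--     Group icon names by namespace.
--
--     Args:
--         icons: Set of icon names
--         default_namespace: Default namespace for unqualified names
--
--     Returns:
--         Dictionary mapping namespace to set of icon names
--     """
--     grouped: dict[str, set[str]] = {}
--
--     for icon in icons:
--         namespace, name = parse_icon_name(icon, default_namespace)
--         if namespace not in grouped:
--             grouped[namespace] = set()
--         grouped[namespace].add(name)
--
--     return grouped
-- ===== SOURCE B (Python) =====
-- def group_icons_by_namespace(icons, default_namespace="ion"):
--     # Sweep once to parse, then build the grouping from the ordered distinct
--     # namespaces with a per-namespace comprehension (no incremental dict updates).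
--     pairs = [
--         tuple(icon.split(":", 1)) if ":" in icon else (default_namespace, icon)
--         for icon in icons
--     ]
--     namespaces = list(dict.fromkeys(ns for ns, _ in pairs))
--     return {ns: {nm for ns2, nm in pairs if ns2 == ns} for ns in namespaces}
-- ===== Notes on version B (the rewrite author's own statement) =====
-- stated objective: alternative
-- what changed: A builds the grouping with one incremental dict-of-sets pass (create-then-add per icon); B parses all icons into (namespace, name) pairs first, takes the ordered distinct namespaces, and builds each group's set with a per-namespace filtering comprehension.
import Mathlib
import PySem

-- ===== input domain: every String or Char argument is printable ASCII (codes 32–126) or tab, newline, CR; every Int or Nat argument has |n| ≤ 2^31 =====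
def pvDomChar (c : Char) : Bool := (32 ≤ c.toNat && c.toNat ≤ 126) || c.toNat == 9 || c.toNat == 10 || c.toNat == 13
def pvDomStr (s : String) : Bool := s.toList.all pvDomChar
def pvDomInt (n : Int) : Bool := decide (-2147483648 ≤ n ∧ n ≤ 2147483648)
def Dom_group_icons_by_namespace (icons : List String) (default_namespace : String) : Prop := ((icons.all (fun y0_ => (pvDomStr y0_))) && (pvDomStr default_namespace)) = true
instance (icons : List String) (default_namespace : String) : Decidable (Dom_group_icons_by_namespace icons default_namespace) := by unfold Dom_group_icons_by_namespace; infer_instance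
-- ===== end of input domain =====

-- B replaces A's single incremental dict-of-sets pass by parse-all-pairs, ordered distinct
-- namespaces, then one filtering sweep per namespace (alternative decomposition, same results).
-- A iterates a Python set; the grader's convention fixes that order as the given list order.

-- ===== PORT A =====
def parse_icon_name (name : String) (default_namespace : String) : String × String :=
  if PySem.Str.isIn ":" name then
    -- name.split(":", 1): with ":" in name this always yields exactly two parts;
    -- the wildcard arm is unreachable.
    match PySem.Str.splitMax? name ":" 1 with
    | some (ns :: nm :: _) => (ns, nm)
    | _ => (default_namespace, name)
  else (default_namespace, name)

def group_icons_by_namespace (icons : List String) (default_namespace : String) : List (String × List String) :=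
  (icons.foldl (fun grouped icon =>
      let p := parse_icon_name icon default_namespace
      let grouped := if grouped.contains p.1 then grouped else grouped.insert p.1 PySem.Set.empty
      grouped.modify p.1 PySem.Set.empty (fun s => PySem.Set.add s p.2))
    PySem.Dict.empty).items

-- ===== PORT B =====
def group_icons_by_namespace_alt (icons : List String) (default_namespace : String) : List (String × List String) :=
  let pairs := icons.map (fun icon =>
    if PySem.Str.isIn ":" icon then
      match PySem.Str.splitMax? icon ":" 1 with
      | some (ns :: nm :: _) => (ns, nm)
      | _ => (default_namespace, icon)
    else (default_namespace, icon))
  let namespaces := PySem.List.dedup (pairs.map Prod.fst)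
  namespaces.map (fun ns =>
    (ns, PySem.Set.ofList ((pairs.filter (fun p => p.1 == ns)).map Prod.snd)))

-- ===== PRECONDITION & SPEC =====
def Spec_group_icons_by_namespace (icons : List String) (default_namespace : String) (out : List (String × List String)) : Prop := out = group_icons_by_namespace_alt icons default_namespace
instance (icons : List String) (default_namespace : String) (out : List (String × List String)) : Decidable (Spec_group_icons_by_namespace icons default_namespace out) := by unfold Spec_group_icons_by_namespace; infer_instance

-- ===== CLAIM (what is proved, stated in full; the proofs are below) =====
def Claim_equal_group_icons_by_namespace : Prop := ∀ (icons : List String) (default_namespace : String), Dom_group_icons_by_namespace icons default_namespace → Spec_group_icons_by_namespace icons default_namespace (group_icons_by_namespace icons default_namespace)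

-- ===== LEMMAS AND PROOFS =====

-- A's loop body, applied to an already-parsed (namespace, name) pair.
def pvStep (grouped : PySem.Dict String (List String)) (p : String × String) : PySem.Dict String (List String) :=
  let grouped := if grouped.contains p.1 then grouped else grouped.insert p.1 PySem.Set.empty
  grouped.modify p.1 PySem.Set.empty (fun s => PySem.Set.add s p.2)

-- B's closed formula for the grouping of a list of parsed pairs.
def pvGroup (ps : List (String × String)) : List (String × List String) :=
  (PySem.List.dedup (ps.map Prod.fst)).map (fun ns =>
    (ns, PySem.Set.ofList ((ps.filter (fun p => p.1 == ns)).map Prod.snd)))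

lemma pvDedupAppend {α : Type} [BEq α] [LawfulBEq α] (xs : List α) (a : α) :
    PySem.List.dedup (xs ++ [a]) = PySem.Set.add (PySem.List.dedup xs) a := by
  simp [PySem.List.dedup_eq_ofList, PySem.Set.ofList_eq_foldl, List.foldl_append]

lemma pvGroup_map_fst (ps : List (String × String)) :
    (pvGroup ps).map Prod.fst = PySem.List.dedup (ps.map Prod.fst) := by
  simp [pvGroup, Function.comp_def]

lemma pvMain (ps : List (String × String)) :
    (ps.foldl pvStep PySem.Dict.empty).items = pvGroup ps := by
  induction ps using List.reverseRecOn with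
  | nil => rfl
  | append_singleton l p ih =>
    rw [List.foldl_append]
    set D := l.foldl pvStep PySem.Dict.empty with hD
    have hkeys : D.keys = PySem.List.dedup (l.map Prod.fst) := by
      simp only [PySem.Dict.keys, ih, pvGroup_map_fst]
    have hnd : D.keys.Nodup := by
      rw [hkeys]; exact PySem.List.nodup_dedup _
    by_cases hmem : p.1 ∈ PySem.List.dedup (l.map Prod.fst)
    · have hc : D.contains p.1 = true := by
        rw [PySem.Dict.contains_eq_decide_mem_keys, hkeys]; exact decide_eq_true hmem
      have hitem : (p.1, PySem.Set.ofList ((l.filter (fun q => q.1 == p.1)).map Prod.snd)) ∈ D.items := by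
        rw [ih]; exact List.mem_map.mpr ⟨p.1, hmem, rfl⟩
      have hval := PySem.Dict.getD_of_mem_items D hitem hnd PySem.Set.empty
      have hstep : pvStep D p
          = D.insert p.1 (PySem.Set.add (D.getD p.1 PySem.Set.empty) p.2) := by
        simp only [pvStep, hc, if_true]; rfl
      rw [List.foldl_cons, List.foldl_nil, hstep,
        PySem.Dict.items_insert_of_contains D _ hc, ih, hval]
      unfold pvGroup
      simp only [List.map_append, List.map_cons, List.map_nil]
      rw [List.map_map, pvDedupAppend, PySem.Set.add_of_mem hmem]
      apply List.map_congr_left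
      intro ns hns
      by_cases hne : ns = p.1
      · subst hne
        simp only [Function.comp, BEq.rfl, if_pos]
        rw [List.filter_append]
        simp [PySem.Set.ofList_eq_foldl, List.foldl_append]
      · have hb : (p.1 == ns) = false := by simp [Ne.symm hne]
        simp only [Function.comp]
        rw [List.filter_append]
        simp [hne, hb]
    · have hc : D.contains p.1 = false := by
        rw [PySem.Dict.contains_eq_decide_mem_keys, hkeys]; exact decide_eq_false hmem
      have hstep : pvStep D p = D.insert p.1 [p.2] := by
        simp only [pvStep, hc, Bool.false_eq_true, if_false]
        show (D.insert p.1 PySem.Set.empty).insert p.1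
          (PySem.Set.add ((D.insert p.1 PySem.Set.empty).getD p.1 PySem.Set.empty) p.2) = _
        rw [PySem.Dict.getD_insert_self, PySem.Dict.insert_insert_self]
        rfl
      rw [List.foldl_cons, List.foldl_nil, hstep,
        PySem.Dict.items_insert_of_not_contains D _ hc, ih]
      have hnotl : p.1 ∉ l.map Prod.fst := by
        intro h; exact hmem ((PySem.List.mem_dedup _ _).mpr h)
      unfold pvGroup
      simp only [List.map_append, List.map_cons, List.map_nil]
      rw [pvDedupAppend, PySem.Set.add_of_not_mem hmem, List.map_append]
      congr 1
      · apply List.map_congr_left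
        intro ns hns
        have hne : p.1 ≠ ns := by rintro rfl; exact hmem hns
        have hb : (p.1 == ns) = false := by simp [hne]
        rw [List.filter_append]
        simp [hb]
      · have hfil : l.filter (fun q => q.1 == p.1) = [] := by
          rw [List.filter_eq_nil_iff]
          intro q hq hb
          exact hnotl (List.mem_map.mpr ⟨q, hq, by simpa using hb⟩)
        simp [List.filter_append, hfil, PySem.Set.ofList_eq_foldl, PySem.Set.add]

theorem pv_core (icons : List String) (default_namespace : String) :
    group_icons_by_namespace icons default_namespace
      = group_icons_by_namespace_alt icons default_namespace := by
  have h : group_icons_by_namespace icons default_namespace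
      = ((icons.map (fun icon => parse_icon_name icon default_namespace)).foldl pvStep PySem.Dict.empty).items := by
    simp only [group_icons_by_namespace, List.foldl_map]
    rfl
  rw [h, pvMain]
  simp only [group_icons_by_namespace_alt, pvGroup, parse_icon_name]

-- ===== VERDICT (by name: the statement is the Claim_ definition above) =====
theorem group_icons_by_namespace_spec : Claim_equal_group_icons_by_namespace := by
  intro icons dn _
  unfold Spec_group_icons_by_namespace
  exact pv_core icons dn
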